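-- pv_equiv track=rewrite | github.com/Tim-Gaede/UCF_HSPT_2019_Codenames | codenames.py | makePossibleCodes
-- ===== SOURCE A (Python) =====
-- def makePossibleCodes(s):
--     su = s.upper()
--     res = []
--     for i in range(1, len(su)):
--         if su[i] < 'A' or su[i] > 'Z':
--             continue
--         for j in range(i+1, len(su)):
--             if su[j] < 'A' or su[j] > 'Z':
--                 continue
--             res.append(str(su[0]) + str(su[i]) + str(su[j]))
--     return res
-- ===== SOURCE B (Python) =====
-- def makePossibleCodes(s):
--     su = s.upper()
--     prefix = su[:1]
--     blocks = []
--     suffix = []  # valid letters strictly after the current position, in order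
--     for c in reversed(su[1:]):
--         if 'A' <= c <= 'Z':
--             blocks.append([prefix + c + b for b in suffix])
--             suffix = [c] + suffix
--     res = []
--     for blk in reversed(blocks):
--         res += blk
--     return res
-- ===== Notes on version B (the rewrite author's own statement) =====
-- stated objective: alternative
-- what changed: Replaces A's nested forward index loops (re-testing letterhood in the inner loop) by a single right-to-left pass that builds the result back-to-front while maintaining a suffix accumulator of the valid letters already seen.
import Mathlib
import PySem

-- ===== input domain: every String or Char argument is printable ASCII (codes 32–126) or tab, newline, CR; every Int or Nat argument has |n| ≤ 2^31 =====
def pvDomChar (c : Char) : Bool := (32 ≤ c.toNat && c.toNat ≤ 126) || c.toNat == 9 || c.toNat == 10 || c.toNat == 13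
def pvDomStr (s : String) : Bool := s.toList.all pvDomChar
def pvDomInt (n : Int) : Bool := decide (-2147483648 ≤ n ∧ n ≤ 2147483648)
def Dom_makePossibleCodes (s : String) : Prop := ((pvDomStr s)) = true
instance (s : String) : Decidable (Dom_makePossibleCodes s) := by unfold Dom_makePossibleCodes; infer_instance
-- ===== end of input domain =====

-- B replaces A's nested forward index loops by a single right-to-left pass that builds the
-- result back-to-front while keeping a suffix accumulator of the valid letters seen so far.

-- ===== PORT A =====
def makePossibleCodes (s : String) : List String :=
  let su := PySem.Chars.upper s.toList
  let n : Int := su.length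
  (PySem.List.pyRange 1 n 1).foldl (fun res i =>
    if PySem.List.pyGetD su i ' ' < 'A' ∨ 'Z' < PySem.List.pyGetD su i ' ' then res
    else
      (PySem.List.pyRange (i + 1) n 1).foldl (fun res2 j =>
        if PySem.List.pyGetD su j ' ' < 'A' ∨ 'Z' < PySem.List.pyGetD su j ' ' then res2
        else res2 ++ [String.mk [PySem.List.pyGetD su 0 ' ',
                                 PySem.List.pyGetD su i ' ',
                                 PySem.List.pyGetD su j ' ']]) res) []

-- ===== PORT B =====
def makePossibleCodes_alt (s : String) : List String :=
  let su := PySem.Chars.upper s.toList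
  let pre := PySem.List.slice su none (some 1)
  let st := ((PySem.List.slice su (some 1) none).reverse).foldl
    (fun st c =>
      if 'A' ≤ c ∧ c ≤ 'Z' then
        (st.2.map (fun b => String.mk (pre ++ [c, b])) ++ st.1, c :: st.2)
      else st)
    (([], []) : List String × List Char)
  st.1

-- ===== PRECONDITION & SPEC =====
def Spec_makePossibleCodes (s : String) (out : List String) : Prop := out = makePossibleCodes_alt s
instance (s : String) (out : List String) : Decidable (Spec_makePossibleCodes s out) := by unfold Spec_makePossibleCodes; infer_instance

-- ===== CLAIM (what is proved, stated in full; the proofs are below) =====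
def Claim_equal_makePossibleCodes : Prop := ∀ (s : String), Dom_makePossibleCodes s → Spec_makePossibleCodes s (makePossibleCodes s)

-- ===== LEMMAS AND PROOFS =====

/-- The triples A collects while scanning a suffix of the uppercased input. -/
def pvCodes (c0 : Char) : List Char → List String
  | [] => []
  | a :: rest =>
      (if 'A' ≤ a ∧ a ≤ 'Z' then
        (rest.filter (fun b => decide ('A' ≤ b ∧ b ≤ 'Z'))).map (fun b => String.mk [c0, a, b])
      else []) ++ pvCodes c0 rest

/-- A's guard `su[x] < 'A' or su[x] > 'Z'` is the negation of B's letter test. -/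
lemma pvGuard (c : Char) : (c < 'A' ∨ 'Z' < c) ↔ ¬ ('A' ≤ c ∧ c ≤ 'Z') := by
  rw [not_and_or, not_le, not_le]

lemma pvInner (su : List Char) (c0 ci : Char) (k : Int) (h0 : 0 ≤ k) (acc : List String) :
    (PySem.List.pyRange k (su.length : Int) 1).foldl (fun res2 j =>
        if PySem.List.pyGetD su j ' ' < 'A' ∨ 'Z' < PySem.List.pyGetD su j ' ' then res2
        else res2 ++ [String.mk [c0, ci, PySem.List.pyGetD su j ' ']]) acc
      = acc ++ ((su.drop k.toNat).filter (fun b => decide ('A' ≤ b ∧ b ≤ 'Z'))).map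
          (fun b => String.mk [c0, ci, b]) := by
  rw [PySem.List.foldl_pyRange_pyGetD' su ' '
        (fun res2 c => if c < 'A' ∨ 'Z' < c then res2
              else res2 ++ [String.mk [c0, ci, c]]) acc h0]
  rw [PySem.List.foldl_congr_mem (su.drop k.toNat)
        (g := fun r c => if 'A' ≤ c ∧ c ≤ 'Z' then r ++ [String.mk [c0, ci, c]] else r)
        _ acc ?_]
  · exact PySem.List.foldl_append_ite _ _ _ _
  · intro r c _
    by_cases hc : 'A' ≤ c ∧ c ≤ 'Z'
    · simp only [if_neg (fun hg => (pvGuard c).mp hg hc), if_pos hc]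
    · simp only [if_pos ((pvGuard c).mpr hc), if_neg hc]

lemma pvOuter (su : List Char) (c0 : Char) :
    ∀ (m : Nat) (k : Int), 0 ≤ k → ∀ (acc : List String), su.length - k.toNat ≤ m →
    (PySem.List.pyRange k (su.length : Int) 1).foldl (fun res i =>
      if PySem.List.pyGetD su i ' ' < 'A' ∨ 'Z' < PySem.List.pyGetD su i ' ' then res
      else
        (PySem.List.pyRange (i + 1) (su.length : Int) 1).foldl (fun res2 j =>
          if PySem.List.pyGetD su j ' ' < 'A' ∨ 'Z' < PySem.List.pyGetD su j ' ' then res2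
          else res2 ++ [String.mk [c0, PySem.List.pyGetD su i ' ',
                                   PySem.List.pyGetD su j ' ']]) res) acc
      = acc ++ pvCodes c0 (su.drop k.toNat) := by
  intro m
  induction m with
  | zero =>
      intro k h0 acc hm
      have hk : (su.length : Int) ≤ k := by omega
      rw [PySem.List.pyRange_one_eq_nil hk, List.drop_eq_nil_of_le (by omega)]
      simp [pvCodes]
  | succ m ih =>
      intro k h0 acc hm
      by_cases hk : (su.length : Int) ≤ k
      · rw [PySem.List.pyRange_one_eq_nil hk, List.drop_eq_nil_of_le (by omega)]
        simp [pvCodes]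
      · push_neg at hk
        have hkn : k.toNat < su.length := by omega
        rw [PySem.List.pyRange_one_cons hk, List.foldl_cons]
        have hget : PySem.List.pyGetD su k ' ' = su[k.toNat] :=
          PySem.List.pyGetD_eq_getElem su ' ' h0 hk
        have hdrop : su.drop k.toNat = su[k.toNat] :: su.drop (k.toNat + 1) :=
          (List.getElem_cons_drop hkn).symm
        rw [ih (k + 1) (by omega) _ (by omega), hdrop]
        have htn : (k + 1).toNat = k.toNat + 1 := by omega
        rw [htn, hget]
        by_cases hL : 'A' ≤ su[k.toNat] ∧ su[k.toNat] ≤ 'Z'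
        · rw [if_neg (fun hg => (pvGuard _).mp hg hL)]
          rw [pvInner su c0 su[k.toNat] (k + 1) (by omega) acc, htn]
          simp [pvCodes, hL]
        · rw [if_pos ((pvGuard _).mpr hL)]
          simp [pvCodes, hL]

/-- B's right-to-left pass: the accumulated pair is (codes of the suffix, its valid letters). -/
lemma pvScan (c0 : Char) (l : List Char) :
    l.reverse.foldl
      (fun st c =>
        if 'A' ≤ c ∧ c ≤ 'Z' then
          (st.2.map (fun b => String.mk ([c0] ++ [c, b])) ++ st.1, c :: st.2)
        else st)
      (([], []) : List String × List Char)
    = (pvCodes c0 l, l.filter (fun b => decide ('A' ≤ b ∧ b ≤ 'Z'))) := by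
  rw [List.foldl_reverse]
  induction l with
  | nil => simp [pvCodes]
  | cons a rest ih =>
      rw [List.foldr_cons, ih]
      by_cases hL : 'A' ≤ a ∧ a ≤ 'Z'
      · simp [pvCodes, hL]
      · simp [pvCodes, hL]

-- ===== VERDICT (by name: the statement is the Claim_ definition above) =====
theorem makePossibleCodes_spec : Claim_equal_makePossibleCodes := by
  intro s _
  show makePossibleCodes s = makePossibleCodes_alt s
  simp only [makePossibleCodes, makePossibleCodes_alt]
  generalize PySem.Chars.upper s.toList = su
  cases su with
  | nil =>
      rw [PySem.List.pyRange_one_eq_nil (by simp)]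
      simp [PySem.List.slice]
  | cons a rest =>
      rw [pvOuter (a :: rest) (PySem.List.pyGetD (a :: rest) 0 ' ')
            (a :: rest).length 1 (by omega) [] (by omega)]
      rw [PySem.List.slice_from _ (by omega), PySem.List.slice_to _ (by omega)]
      have hget : PySem.List.pyGetD (a :: rest) 0 ' ' = a := by
        rw [PySem.List.pyGetD_eq_getElem _ ' ' (by omega) (by simp)]
        simp
      rw [hget]
      have h1 : ((1 : Int)).toNat = 1 := rfl
      rw [h1]
      simp only [List.take, List.drop]
      rw [pvScan a rest]
      simp
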